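-- pv_equiv track=rewrite | github.com/gsterner/isingcomp | src/polymersim.py | brute_force_position_configs
-- ===== SOURCE A (Python) =====
-- import enum
--
-- class Direction(enum.Enum):
--     NORTH = enum.auto()
--     SOUTH = enum.auto()
--     EAST  = enum.auto()
--     WEST  = enum.auto()
--
-- ALL_DIRECTIONS = [Direction.NORTH, Direction.SOUTH, Direction.EAST, Direction.WEST]
--
-- def step_from_direction(direction_in):
--     if direction_in == Direction.NORTH:
--         return [0,1]
--     if direction_in == Direction.SOUTH:
--         return [0,-1]
--     if direction_in == Direction.EAST:
--         return [1, 0]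
--     return [-1, 0]
--
-- def update_position(position_list, step):
--     current_position = position_list[-1]
--     new_position = [current_position[0] + step[0], current_position[1] + step[1]]
--     position_list.append(new_position)
--     return position_list
--
-- def add_walks_and_positions(positions):
--     position_configs = []
--     for current_direction in ALL_DIRECTIONS:
--         new_positions = positions.copy()
--         step = step_from_direction(current_direction)
--         position_configs.append(update_position(new_positions, step))
--     return position_configs
--
-- def brute_force_position_configs(steps):
--     START = [0,0]
--     position_configs = [[START]]
--     for step in range(steps):
--         new_position_configs = []
--         for current_positions in position_configs:
--             added_position_configs = add_walks_and_positions(current_positions)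
--             new_position_configs.extend(added_position_configs)
--         position_configs = new_position_configs
--     return position_configs
-- ===== SOURCE B (Python) =====
-- DIRS = [(0, 1), (0, -1), (1, 0), (-1, 0)]  # N, S, E, W
--
-- def brute_force_position_configs(steps):
--     if steps <= 0:
--         return [[[0, 0]]]
--     prev = brute_force_position_configs(steps - 1)
--     return [c + [[c[-1][0] + dx, c[-1][1] + dy]] for c in prev for dx, dy in DIRS]
-- ===== Notes on version B (the rewrite author's own statement) =====
-- stated objective: simpler
-- what changed: Replaced the iterative level-expansion over enum directions and mutating helper functions with a short recursion on steps that extends each previous config by the four direction offsets in one comprehension.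
import Mathlib
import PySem

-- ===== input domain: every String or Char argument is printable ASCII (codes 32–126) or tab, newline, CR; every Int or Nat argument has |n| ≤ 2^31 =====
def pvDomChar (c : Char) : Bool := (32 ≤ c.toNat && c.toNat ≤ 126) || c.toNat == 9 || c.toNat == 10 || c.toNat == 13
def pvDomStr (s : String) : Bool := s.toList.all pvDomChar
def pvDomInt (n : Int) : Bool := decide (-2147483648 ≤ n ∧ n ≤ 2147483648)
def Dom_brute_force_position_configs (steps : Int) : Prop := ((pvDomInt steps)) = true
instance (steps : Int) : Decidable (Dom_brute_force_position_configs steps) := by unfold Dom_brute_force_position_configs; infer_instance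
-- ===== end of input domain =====

-- ===== PORT A =====
-- B replaces A's iterative level-expansion with a recursion on steps; objective: simpler.
inductive PvDirection
  | north | south | east | west
deriving DecidableEq, Repr

def pvAllDirections : List PvDirection := [.north, .south, .east, .west]

def pv_step_from_direction (direction_in : PvDirection) : List Int :=
  if direction_in = .north then [0, 1]
  else if direction_in = .south then [0, -1]
  else if direction_in = .east then [1, 0]
  else [-1, 0]

-- position_list[-1] / [0] / [1]: never out of range in context; getD stands for the IndexError path
def pv_update_position (position_list : List (List Int)) (step : List Int) : List (List Int) :=
  let current_position := (PySem.List.pyGet? position_list (-1)).getD []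
  let new_position := [(PySem.List.pyGet? current_position 0).getD 0 + (PySem.List.pyGet? step 0).getD 0,
                       (PySem.List.pyGet? current_position 1).getD 0 + (PySem.List.pyGet? step 1).getD 0]
  position_list ++ [new_position]

def pv_add_walks_and_positions (positions : List (List Int)) : List (List (List Int)) :=
  pvAllDirections.foldl
    (fun position_configs current_direction =>
      position_configs ++ [pv_update_position positions (pv_step_from_direction current_direction)])
    []

def brute_force_position_configs (steps : Int) : List (List (List Int)) :=
  (PySem.List.pyRange 0 steps 1).foldl
    (fun position_configs _ =>
      position_configs.foldl
        (fun new_position_configs current_positions =>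
          new_position_configs ++ pv_add_walks_and_positions current_positions)
        [])
    [[[0, 0]]]

-- ===== PORT B =====
def pvDirsB : List (Int × Int) := [(0, 1), (0, -1), (1, 0), (-1, 0)]

def brute_force_position_configs_alt (steps : Int) : List (List (List Int)) :=
  if h : steps ≤ 0 then [[[0, 0]]]
  else
    (brute_force_position_configs_alt (steps - 1)).flatMap
      (fun c =>
        pvDirsB.map (fun d =>
          c ++ [[(PySem.List.pyGet? ((PySem.List.pyGet? c (-1)).getD []) 0).getD 0 + d.1,
                 (PySem.List.pyGet? ((PySem.List.pyGet? c (-1)).getD []) 1).getD 0 + d.2]]))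
  termination_by steps.toNat
  decreasing_by omega

-- ===== PRECONDITION & SPEC =====
def Spec_brute_force_position_configs (steps : Int) (out : List (List (List Int))) : Prop := out = brute_force_position_configs_alt steps
instance (steps : Int) (out : List (List (List Int))) : Decidable (Spec_brute_force_position_configs steps out) := by unfold Spec_brute_force_position_configs; infer_instance

-- ===== CLAIM (what is proved, stated in full; the proofs are below) =====
def Claim_equal_brute_force_position_configs : Prop := ∀ (steps : Int), Dom_brute_force_position_configs steps → Spec_brute_force_position_configs steps (brute_force_position_configs steps)

-- ===== LEMMAS AND PROOFS =====

-- one expansion level, as A computes it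
def pvLevel (pcs : List (List (List Int))) : List (List (List Int)) :=
  pcs.foldl (fun acc cp => acc ++ pv_add_walks_and_positions cp) []

lemma pv_add_eq_map (cp : List (List Int)) :
    pv_add_walks_and_positions cp =
      pvDirsB.map (fun d =>
        cp ++ [[(PySem.List.pyGet? ((PySem.List.pyGet? cp (-1)).getD []) 0).getD 0 + d.1,
                (PySem.List.pyGet? ((PySem.List.pyGet? cp (-1)).getD []) 1).getD 0 + d.2]]) := by
  simp [pv_add_walks_and_positions, pvAllDirections, pvDirsB, List.foldl,
        pv_update_position, pv_step_from_direction, PySem.List.pyGet?, PySem.List.pyIdx?]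

lemma pvLevel_eq_flatMap (pcs : List (List (List Int))) :
    pvLevel pcs = pcs.flatMap pv_add_walks_and_positions := by
  simpa [pvLevel] using PySem.List.foldl_append_eq_flatMap pv_add_walks_and_positions pcs

lemma pv_foldl_const {α : Type} (f : List (List (List Int)) → List (List (List Int)))
    (l : List α) (init : List (List (List Int))) :
    l.foldl (fun acc _ => f acc) init = f^[l.length] init := by
  induction l generalizing init with
  | nil => simp
  | cons x xs ih => simp [List.foldl, ih, Function.iterate_succ_apply]

lemma pvA_eq_iter (steps : Int) :
    brute_force_position_configs steps = pvLevel^[steps.toNat] [[[0, 0]]] := by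
  have := pv_foldl_const pvLevel (PySem.List.pyRange 0 steps 1) [[[0, 0]]]
  simpa [brute_force_position_configs, pvLevel, PySem.List.length_pyRange_one] using this

lemma pvB_eq_iter : ∀ (n : Nat) (steps : Int), steps.toNat = n →
    brute_force_position_configs_alt steps = pvLevel^[n] [[[0, 0]]] := by
  intro n
  induction n with
  | zero =>
    intro steps h
    have hle : steps ≤ 0 := by omega
    rw [brute_force_position_configs_alt]
    simp [hle]
  | succ k ih =>
    intro steps h
    have hpos : ¬ steps ≤ 0 := by omega
    rw [brute_force_position_configs_alt, dif_neg hpos]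
    rw [ih (steps - 1) (by omega), Function.iterate_succ_apply', pvLevel_eq_flatMap,
        funext pv_add_eq_map]

-- ===== VERDICT (by name: the statement is the Claim_ definition above) =====
theorem brute_force_position_configs_spec : Claim_equal_brute_force_position_configs := by
  intro steps _
  unfold Spec_brute_force_position_configs
  rw [pvA_eq_iter, pvB_eq_iter steps.toNat steps rfl]
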